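-- pv_equiv track=rewrite | github.com/MaximShoustin/Workout | workout_planner.py | can_add_station_to_workout
-- ===== SOURCE A (Python) =====
-- def get_station_equipment_requirements(step_equipments: list, people_per_station: int = 1) -> dict:
--     """
--     Calculate equipment requirements for a single station with N steps.
--
--     The calculation depends on whether exercises happen simultaneously or sequentially:
--     - If people_per_station > 1: All steps happen simultaneously (need sum of all step equipment)
--     - If people_per_station = 1: All steps are sequential (need MAX of all step equipment)
--
--     Args:
--         step_equipments: List of equipment dicts for each step [step1_equipment, step2_equipment, ...]
--         people_per_station: Number of people assigned to this station
--
--     Returns: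
--         Dict with equipment requirements for the station
--     """
--     if not step_equipments:
--         return {}
--
--     station_requirements = {}
--
--     # Get all equipment types from all steps
--     all_equipment_types = set()
--     for step_equipment in step_equipments:
--         all_equipment_types.update(step_equipment.keys())
--
--     for equipment_type in all_equipment_types:
--         step_counts = []
--         for step_equipment in step_equipments:
--             count = step_equipment.get(equipment_type, {}).get("count", 0)
--             step_counts.append(count)
--
--         if people_per_station > 1:
--             # Multiple people per station: all steps happen simultaneously
--             # Need equipment for all exercises at the same time
--             required_count = sum(step_counts)
--         else:
--             # Single person per station: all steps are sequential
--             # Need the maximum of all exercises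
--             required_count = max(step_counts) if step_counts else 0
--
--         if required_count > 0:
--             station_requirements[equipment_type] = {"count": required_count}
--
--     return station_requirements
--
-- def can_add_station_to_workout(step_equipments: list, cumulative_station_usage: dict, available_inventory: dict, people_per_station: int = 1) -> bool:
--     """
--     Check if adding a station with given step exercises would exceed equipment limits.
--
--     Args:
--         step_equipments: List of equipment dicts for each step [step1_equipment, step2_equipment, ...]
--         cumulative_station_usage: Current total equipment usage across all stations
--         available_inventory: Available equipment from plan.json
--         people_per_station: Number of people assigned to each station
--
--     Returns:
--         True if station can be added without exceeding limits
--     """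
--     if not available_inventory:
--         return True  # No validation if no inventory defined
--
--     # Get equipment requirements for this station (considering simultaneous vs sequential execution)
--     station_requirements = get_station_equipment_requirements(step_equipments, people_per_station)
--
--     # Simulate adding this station's requirements to cumulative usage
--     test_usage = {}
--     for equipment_type, equipment_info in cumulative_station_usage.items():
--         test_usage[equipment_type] = {"count": equipment_info["count"]}  # Deep copy
--
--     for equipment_type, equipment_info in station_requirements.items():
--         if equipment_type in test_usage:
--             test_usage[equipment_type]["count"] += equipment_info["count"]
--         else:
--             test_usage[equipment_type] = {"count": equipment_info["count"]}
--
--     # Check if any equipment would be exceeded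
--     for equipment_type, usage_info in test_usage.items():
--         required_count = usage_info.get("count", 0)
--         available_count = available_inventory.get(equipment_type, {}).get("count", 0)
--
--         if required_count > available_count:
--             return False
--
--     return True
-- ===== SOURCE B (Python) =====
-- def can_add_station_to_workout(step_equipments: list, cumulative_station_usage: dict, available_inventory: dict, people_per_station: int = 1) -> bool:
--     if not available_inventory:
--         return True  # no validation if no inventory defined
--
--     # One pass over the steps: per-type total (sum if people work simultaneously,
--     # running max if they go one after another).
--     totals = {}
--     for step_equipment in step_equipments:
--         for equipment_type, info in step_equipment.items():
--             count = info.get("count", 0)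
--             if people_per_station > 1:
--                 totals[equipment_type] = totals.get(equipment_type, 0) + count
--             else:
--                 totals[equipment_type] = max(totals.get(equipment_type, 0), count)
--
--     # Only positive totals constitute a real requirement.
--     required = {t: c for t, c in totals.items() if c > 0}
--
--     # Check every equipment type that is either already in use or newly required.
--     for equipment_type in cumulative_station_usage.keys() | required.keys():
--         combined = (cumulative_station_usage.get(equipment_type, {}).get("count", 0)
--                     + required.get(equipment_type, 0))
--         if combined > available_inventory.get(equipment_type, {}).get("count", 0):
--             return False
--     return True
-- ===== Notes on version B (the rewrite author's own statement) =====
-- stated objective: simpler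
-- what changed: B inlines the helper and replaces A's three passes (collect the set of types, rescan all steps per type to build a requirements dict, copy cumulative usage into a merged test dict) by one accumulation pass over the steps (sum or running max per type), a comprehension keeping the positive requirements, and a single check over the union of cumulative-usage keys and requirement keys with no merged dict built; Pre_ excludes exactly the inputs where A raises KeyError (non-empty inventory with a cumulative-usage value lacking a 'count' key).
import Mathlib
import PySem

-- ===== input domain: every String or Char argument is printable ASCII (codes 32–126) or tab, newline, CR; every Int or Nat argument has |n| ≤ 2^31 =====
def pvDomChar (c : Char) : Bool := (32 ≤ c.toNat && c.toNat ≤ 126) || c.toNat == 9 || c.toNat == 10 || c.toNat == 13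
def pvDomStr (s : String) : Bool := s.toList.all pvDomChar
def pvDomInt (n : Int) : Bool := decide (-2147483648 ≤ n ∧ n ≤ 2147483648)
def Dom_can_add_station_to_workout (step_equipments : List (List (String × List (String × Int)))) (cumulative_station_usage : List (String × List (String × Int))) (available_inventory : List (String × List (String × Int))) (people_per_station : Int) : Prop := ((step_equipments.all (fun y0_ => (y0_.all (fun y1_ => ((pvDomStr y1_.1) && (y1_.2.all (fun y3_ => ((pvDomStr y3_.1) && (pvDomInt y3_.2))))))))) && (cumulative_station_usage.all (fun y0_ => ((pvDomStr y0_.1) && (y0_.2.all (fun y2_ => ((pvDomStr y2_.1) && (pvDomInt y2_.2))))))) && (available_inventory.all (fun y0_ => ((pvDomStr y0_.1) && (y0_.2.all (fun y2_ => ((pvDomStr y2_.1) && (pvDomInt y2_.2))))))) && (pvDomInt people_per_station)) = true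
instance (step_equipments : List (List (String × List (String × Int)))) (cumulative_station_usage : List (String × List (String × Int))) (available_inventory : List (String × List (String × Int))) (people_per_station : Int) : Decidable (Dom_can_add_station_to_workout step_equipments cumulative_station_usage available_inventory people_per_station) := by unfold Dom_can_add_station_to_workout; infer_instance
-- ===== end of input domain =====

-- B replaces A's set-then-rescan-then-merged-dict computation by one accumulation pass over the
-- steps, a comprehension keeping the positive requirements, and one check over the union of the
-- relevant keys; objective: simpler (return value only, no mutation).

-- boundary conversion shared by both ports: a Python dict[str, dict[str, int]] argument
def pvDict (l : List (String × List (String × Int))) : PySem.Dict String (PySem.Dict String Int) :=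
  PySem.Dict.ofList (l.map (fun p => (p.1, PySem.Dict.ofList p.2)))

-- ===== PORT A =====
def pv_get_station_equipment_requirements
    (step_equipments : List (PySem.Dict String (PySem.Dict String Int)))
    (people_per_station : Int) : PySem.Dict String (PySem.Dict String Int) :=
  if step_equipments.isEmpty then PySem.Dict.empty
  else
    let all_equipment_types : PySem.Set String :=
      step_equipments.foldl (fun s step => PySem.Set.update s step.keys) PySem.Set.empty
    all_equipment_types.foldl (fun station_requirements equipment_type =>
      let step_counts : List Int :=
        step_equipments.map (fun step => (step.getD equipment_type PySem.Dict.empty).getD "count" 0)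
      let required_count : Int :=
        if people_per_station > 1 then step_counts.sum
        else match PySem.List.max? step_counts id with
             | some m => m
             | none => 0
      if required_count > 0 then
        station_requirements.insert equipment_type (PySem.Dict.empty.insert "count" required_count)
      else station_requirements) PySem.Dict.empty

def can_add_station_to_workout (step_equipments : List (List (String × List (String × Int)))) (cumulative_station_usage : List (String × List (String × Int))) (available_inventory : List (String × List (String × Int))) (people_per_station : Int) : Bool :=
  if available_inventory.isEmpty then true
  else
    let station_requirements :=
      pv_get_station_equipment_requirements (step_equipments.map pvDict) people_per_station
    let cumD := pvDict cumulative_station_usage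
    let availD := pvDict available_inventory
    -- equipment_info["count"] is raw indexing in A: total here via getD, exact under Pre_
    let test_usage :=
      cumD.items.foldl
        (fun t p => t.insert p.1 (PySem.Dict.empty.insert "count" (p.2.getD "count" 0)))
        PySem.Dict.empty
    let test_usage2 :=
      station_requirements.items.foldl
        (fun t p =>
          if t.contains p.1 then
            t.modify p.1 PySem.Dict.empty (fun inner => inner.modify "count" 0 (· + p.2.getD "count" 0))
          else t.insert p.1 (PySem.Dict.empty.insert "count" (p.2.getD "count" 0)))
        test_usage
    test_usage2.items.all
      (fun p => !(p.2.getD "count" 0 > (availD.getD p.1 PySem.Dict.empty).getD "count" 0))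

-- ===== PORT B =====
def can_add_station_to_workout_alt (step_equipments : List (List (String × List (String × Int)))) (cumulative_station_usage : List (String × List (String × Int))) (available_inventory : List (String × List (String × Int))) (people_per_station : Int) : Bool :=
  if available_inventory.isEmpty then true
  else
    let cumD := pvDict cumulative_station_usage
    let availD := pvDict available_inventory
    let totals : PySem.Dict String Int :=
      (step_equipments.map pvDict).foldl
        (fun totals step =>
          step.items.foldl
            (fun totals p =>
              let count := p.2.getD "count" 0
              if people_per_station > 1 then totals.insert p.1 (totals.getD p.1 0 + count)
              else totals.insert p.1 (max (totals.getD p.1 0) count))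
            totals)
        PySem.Dict.empty
    let required : PySem.Dict String Int :=
      PySem.Dict.mk (totals.items.filter (fun p => p.2 > 0))
    -- keys() | keys() is a Python set; the all-check below is order-independent
    (PySem.Set.union (PySem.Set.ofList cumD.keys) required.keys).all
      (fun t =>
        !((cumD.getD t PySem.Dict.empty).getD "count" 0 + required.getD t 0
            > (availD.getD t PySem.Dict.empty).getD "count" 0))

-- ===== PRECONDITION & SPEC =====
-- Pre_ excludes exactly the inputs where A raises KeyError: a non-empty inventory together with a
-- cumulative-usage value that has no "count" key.
def Pre_can_add_station_to_workout (step_equipments : List (List (String × List (String × Int)))) (cumulative_station_usage : List (String × List (String × Int))) (available_inventory : List (String × List (String × Int))) (people_per_station : Int) : Prop :=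
  available_inventory = [] ∨ ∀ p ∈ cumulative_station_usage, "count" ∈ p.2.map Prod.fst
instance (step_equipments : List (List (String × List (String × Int)))) (cumulative_station_usage : List (String × List (String × Int))) (available_inventory : List (String × List (String × Int))) (people_per_station : Int) : Decidable (Pre_can_add_station_to_workout step_equipments cumulative_station_usage available_inventory people_per_station) := by unfold Pre_can_add_station_to_workout; infer_instance

def pvWitness_can_add_station_to_workout : (List (List (String × List (String × Int)))) × (List (String × List (String × Int))) × (List (String × List (String × Int))) × Int :=
  ([[("a", [("count", 2)])]], [("a", [("count", 1)])], [("a", [("count", 3)])], 1)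

def Spec_can_add_station_to_workout (step_equipments : List (List (String × List (String × Int)))) (cumulative_station_usage : List (String × List (String × Int))) (available_inventory : List (String × List (String × Int))) (people_per_station : Int) (out : Bool) : Prop := out = can_add_station_to_workout_alt step_equipments cumulative_station_usage available_inventory people_per_station
instance (step_equipments : List (List (String × List (String × Int)))) (cumulative_station_usage : List (String × List (String × Int))) (available_inventory : List (String × List (String × Int))) (people_per_station : Int) (out : Bool) : Decidable (Spec_can_add_station_to_workout step_equipments cumulative_station_usage available_inventory people_per_station out) := by unfold Spec_can_add_station_to_workout; infer_instance

-- ===== CLAIM (what is proved, stated in full; the proofs are below) =====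
def Claim_equal_can_add_station_to_workout : Prop := ∀ (step_equipments : List (List (String × List (String × Int)))) (cumulative_station_usage : List (String × List (String × Int))) (available_inventory : List (String × List (String × Int))) (people_per_station : Int), Dom_can_add_station_to_workout step_equipments cumulative_station_usage available_inventory people_per_station → Pre_can_add_station_to_workout step_equipments cumulative_station_usage available_inventory people_per_station → Spec_can_add_station_to_workout step_equipments cumulative_station_usage available_inventory people_per_station (can_add_station_to_workout step_equipments cumulative_station_usage available_inventory people_per_station)

-- ===== LEMMAS AND PROOFS =====

-- abbreviations for the proofs
def pvOp (pps a c : Int) : Int := if pps > 1 then a + c else max a c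

def pvCnt (step : PySem.Dict String (PySem.Dict String Int)) (t : String) : Int :=
  (step.getD t PySem.Dict.empty).getD "count" 0

def pvGval (steps : List (PySem.Dict String (PySem.Dict String Int))) (pps : Int) (t : String) : Int :=
  steps.foldl (fun a step => if step.contains t then pvOp pps a (pvCnt step t) else a) 0

def pvRc (steps : List (PySem.Dict String (PySem.Dict String Int))) (pps : Int) (t : String) : Int :=
  if pps > 1 then (steps.map (fun step => (step.getD t PySem.Dict.empty).getD "count" 0)).sum
  else match PySem.List.max? (steps.map (fun step => (step.getD t PySem.Dict.empty).getD "count" 0)) id with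
       | some m => m
       | none => 0

def pvKeySet (steps : List (PySem.Dict String (PySem.Dict String Int))) : PySem.Set String :=
  steps.foldl (fun s step => PySem.Set.update s step.keys) PySem.Set.empty

def pvPos (x : Int) : Int := if x > 0 then x else 0

-- (1) generic: an insert-fold never touches a key not among the inserted keys
lemma pv_foldl_insert_get?_of_not_mem {β : Type} {ν : Type}
    (F : PySem.Dict String ν → String × β → ν) (ps : List (String × β)) (t : String)
    (h : t ∉ ps.map Prod.fst) :
    ∀ d : PySem.Dict String ν,
      (ps.foldl (fun r p => r.insert p.1 (F r p)) d).get? t = d.get? t := by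
  induction ps with
  | nil => intro d; rfl
  | cons q ps ih =>
      intro d
      simp only [List.map_cons, List.mem_cons] at h
      push_neg at h
      simp only [List.foldl_cons]
      rw [ih h.2, PySem.Dict.get?_insert]
      simp [h.1]

-- (2) B's inner loop over one step's items
lemma pv_bInner_getD (pps : Int) (ps : List (String × PySem.Dict String Int))
    (hnd : (ps.map Prod.fst).Nodup) :
    ∀ (d : PySem.Dict String Int) (t : String),
      (ps.foldl (fun r p => r.insert p.1 (pvOp pps (r.getD p.1 0) (p.2.getD "count" 0))) d).getD t 0
        = match (PySem.Dict.mk ps).get? t with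
          | some v => pvOp pps (d.getD t 0) (v.getD "count" 0)
          | none => d.getD t 0 := by
  induction ps with
  | nil => intro d t; rfl
  | cons q ps ih =>
      intro d t
      simp only [List.map_cons, List.nodup_cons] at hnd
      simp only [List.foldl_cons]
      by_cases ht : t = q.1
      · subst ht
        have hget := pv_foldl_insert_get?_of_not_mem
          (fun r p => pvOp pps (r.getD p.1 0) (p.2.getD "count" 0)) ps q.1 hnd.1
          (d.insert q.1 (pvOp pps (d.getD q.1 0) (q.2.getD "count" 0)))
        rw [PySem.Dict.getD_eq_get?_getD, hget, ← PySem.Dict.getD_eq_get?_getD,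
          PySem.Dict.getD_insert_self, PySem.Dict.get?_mk_cons]
        simp
      · rw [ih hnd.2, PySem.Dict.get?_mk_cons]
        have : (q.1 == t) = false := by
          simp [beq_iff_eq]; exact fun h => ht h.symm
        rw [this]
        simp only [Bool.false_eq_true, if_false]
        rw [PySem.Dict.getD_insert]
        simp [ht]

-- (3) B's totals dict, valuewise
lemma pv_req_getD (pps : Int) (steps : List (PySem.Dict String (PySem.Dict String Int)))
    (h : ∀ s ∈ steps, s.keys.Nodup) :
    ∀ (d : PySem.Dict String Int) (t : String),
      (steps.foldl (fun r step =>
          step.items.foldl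
            (fun r p => r.insert p.1 (pvOp pps (r.getD p.1 0) (p.2.getD "count" 0))) r) d).getD t 0
        = steps.foldl (fun a step => if step.contains t then pvOp pps a (pvCnt step t) else a)
            (d.getD t 0) := by
  induction steps with
  | nil => intro d t; rfl
  | cons st steps ih =>
      intro d t
      simp only [List.foldl_cons]
      have hst : st.keys.Nodup := h st (by simp)
      have ihh := ih (fun s hs => h s (by simp [hs]))
      rw [ihh]
      have hin := pv_bInner_getD pps st.items hst d t
      have hmk : (PySem.Dict.mk st.items) = st := rfl
      rw [hmk] at hin
      rw [hin]
      congr 1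
      rw [PySem.Dict.contains_eq_isSome_get?]
      cases hq : st.get? t with
      | none => simp
      | some v =>
          simp only [Option.isSome_some, if_true]
          unfold pvCnt
          have hs : st.getD t PySem.Dict.empty = v := by
            rw [PySem.Dict.getD_eq_get?_getD, hq]; rfl
          rw [hs]

-- (4) B's totals dict has unique keys
lemma pv_req_keys_nodup (pps : Int) (steps : List (PySem.Dict String (PySem.Dict String Int))) :
    ∀ d : PySem.Dict String Int, d.keys.Nodup →
      (steps.foldl (fun r step =>
          step.items.foldl
            (fun r p => r.insert p.1 (pvOp pps (r.getD p.1 0) (p.2.getD "count" 0))) r) d).keys.Nodup := by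
  induction steps with
  | nil => intro d hd; exact hd
  | cons st steps ih =>
      intro d hd
      simp only [List.foldl_cons]
      exact ih _ (PySem.Dict.nodup_keys_foldl_insert_key st.items Prod.fst
        (fun r p => pvOp pps (r.getD p.1 0) (p.2.getD "count" 0)) d hd)

-- (5) the set of all equipment types
lemma pv_mem_keySet (steps : List (PySem.Dict String (PySem.Dict String Int))) :
    ∀ (s : PySem.Set String) (t : String),
      t ∈ steps.foldl (fun s step => PySem.Set.update s step.keys) s ↔
        t ∈ s ∨ ∃ step ∈ steps, t ∈ step.keys := by
  induction steps with
  | nil => intro s t; simp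
  | cons st steps ih =>
      intro s t
      simp only [List.foldl_cons]
      rw [ih]
      rw [PySem.Set.mem_update]
      constructor
      · rintro ((h | h) | h)
        · exact Or.inl h
        · exact Or.inr ⟨st, by simp, h⟩
        · rcases h with ⟨sp, hsp, hm⟩; exact Or.inr ⟨sp, by simp [hsp], hm⟩
      · rintro (h | ⟨sp, hsp, hm⟩)
        · exact Or.inl (Or.inl h)
        · rcases List.mem_cons.mp hsp with h | h
          · subst h; exact Or.inl (Or.inr hm)
          · exact Or.inr ⟨sp, h, hm⟩

lemma pv_keySet_nodup (steps : List (PySem.Dict String (PySem.Dict String Int))) :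
    ∀ s : PySem.Set String, s.Nodup →
      (steps.foldl (fun s step => PySem.Set.update s step.keys) s).Nodup := by
  induction steps with
  | nil => intro s hs; exact hs
  | cons st steps ih =>
      intro s hs
      simp only [List.foldl_cons]
      exact ih _ (PySem.Set.nodup_update s st.keys hs)

-- (6) a type no step mentions contributes nothing
lemma pv_cnt_of_not_contains (s : PySem.Dict String (PySem.Dict String Int)) (t : String)
    (h : s.contains t = false) : pvCnt s t = 0 := by
  unfold pvCnt
  rw [PySem.Dict.getD_of_not_contains _ _ h, PySem.Dict.getD_empty]

lemma pv_gval_of_no_contains (steps : List (PySem.Dict String (PySem.Dict String Int)))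
    (pps : Int) (t : String) (h : ∀ s ∈ steps, s.contains t = false) :
    pvGval steps pps t = 0 := by
  unfold pvGval
  induction steps with
  | nil => rfl
  | cons st steps ih =>
      simp only [List.foldl_cons, h st (by simp), Bool.false_eq_true, if_false]
      exact ih (fun s hs => h s (by simp [hs]))

lemma pv_rc_of_no_contains (steps : List (PySem.Dict String (PySem.Dict String Int)))
    (pps : Int) (t : String) (h : ∀ s ∈ steps, s.contains t = false) :
    pvRc steps pps t = 0 := by
  have hz : ∀ x ∈ steps.map (fun step => (step.getD t PySem.Dict.empty).getD "count" 0), x = 0 := by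
    intro x hx
    rcases List.mem_map.mp hx with ⟨s, hs, rfl⟩
    have := pv_cnt_of_not_contains s t (h s hs)
    unfold pvCnt at this
    exact this
  unfold pvRc
  by_cases hp : pps > 1
  · rw [if_pos hp]
    exact List.sum_eq_zero hz
  · rw [if_neg hp]
    cases hm : PySem.List.max? (steps.map (fun step => (step.getD t PySem.Dict.empty).getD "count" 0)) id with
    | none => rfl
    | some m => exact hz m (PySem.List.max?_mem hm)

-- auxiliaries for (7)
lemma pv_gval_sum_aux (pps : Int) (hp : pps > 1) (t : String) :
    ∀ (steps : List (PySem.Dict String (PySem.Dict String Int))) (a : Int),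
      steps.foldl (fun a s => if s.contains t then pvOp pps a (pvCnt s t) else a) a
        = a + (steps.map (fun s => pvCnt s t)).sum := by
  intro steps
  induction steps with
  | nil => intro a; simp
  | cons s steps ih =>
      intro a
      simp only [List.foldl_cons, List.map_cons, List.sum_cons]
      by_cases hc : s.contains t = true
      · rw [if_pos hc, ih]
        unfold pvOp
        rw [if_pos hp]
        ring
      · rw [if_neg hc, ih, pv_cnt_of_not_contains s t (by simpa using hc)]
        ring

lemma pv_gval_max_aux (pps : Int) (hp : ¬ pps > 1) (t : String) :
    ∀ (steps : List (PySem.Dict String (PySem.Dict String Int))) (a : Int), 0 ≤ a →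
      steps.foldl (fun a s => if s.contains t then pvOp pps a (pvCnt s t) else a) a
        = (steps.map (fun s => pvCnt s t)).foldl max a := by
  intro steps
  induction steps with
  | nil => intro a _; simp
  | cons s steps ih =>
      intro a ha
      simp only [List.foldl_cons, List.map_cons]
      by_cases hc : s.contains t = true
      · rw [if_pos hc]
        unfold pvOp
        rw [if_neg hp]
        exact ih _ (le_trans ha (le_max_left _ _))
      · rw [if_neg hc, pv_cnt_of_not_contains s t (by simpa using hc), ih _ ha,
          max_eq_left ha]

lemma pv_foldl_max_le (L : List Int) :
    ∀ a b : Int, a ≤ b → (∀ y ∈ L, y ≤ b) → L.foldl max a ≤ b := by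
  induction L with
  | nil => intro a b hab _; simpa using hab
  | cons x L ih =>
      intro a b hab h
      simp only [List.foldl_cons]
      exact ih _ _ (max_le hab (h x (by simp))) (fun y hy => h y (by simp [hy]))

lemma pv_max?_cons_isSome (x : Int) (L : List Int) :
    (PySem.List.max? (x :: L) id).isSome := by
  unfold PySem.List.max?
  simp only [List.foldl_cons]
  induction L generalizing x with
  | nil => rfl
  | cons y L ih =>
      simp only [List.foldl_cons, id_eq]
      by_cases h : x < y
      · rw [if_pos h]; exact ih y
      · rw [if_neg h]; exact ih x

lemma pv_pos_max? (L : List Int) :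
    pvPos (match PySem.List.max? L id with | some m => m | none => 0)
      = pvPos (L.foldl max 0) := by
  cases hm : PySem.List.max? L id with
  | none =>
      cases L with
      | nil => rfl
      | cons x L => exact absurd hm (by have := pv_max?_cons_isSome x L; simp_all)
  | some m =>
      have hmem : m ∈ L := PySem.List.max?_mem hm
      have hub : ∀ y ∈ L, y ≤ m := by
        have := PySem.List.max?_isMax hm
        simpa using this
      have hF := PySem.List.le_foldl_max L 0
      have hmF : m ≤ L.foldl max 0 := hF.2 m hmem
      by_cases h0 : m > 0
      · have hle : L.foldl max 0 ≤ m := pv_foldl_max_le L 0 m (le_of_lt h0) hub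
        have : L.foldl max 0 = m := le_antisymm hle hmF
        rw [this]
      · have hle : L.foldl max 0 ≤ 0 := pv_foldl_max_le L 0 0 le_rfl
          (fun y hy => le_trans (hub y hy) (by omega))
        have : L.foldl max 0 = 0 := le_antisymm hle hF.1
        rw [this]
        unfold pvPos
        rw [if_neg h0]
        simp

-- (7) positive parts of A's per-type requirement and B's accumulated one agree
lemma pv_pos_rc_eq_pos_gval (steps : List (PySem.Dict String (PySem.Dict String Int)))
    (pps : Int) (t : String) : pvPos (pvRc steps pps t) = pvPos (pvGval steps pps t) := by
  have hcnt : (fun step => (PySem.Dict.getD step t PySem.Dict.empty).getD "count" 0)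
      = fun s => pvCnt s t := rfl
  by_cases hp : pps > 1
  · unfold pvRc pvGval
    rw [if_pos hp, pv_gval_sum_aux pps hp t steps 0, hcnt]
    simp
  · unfold pvRc pvGval
    rw [if_neg hp, pv_gval_max_aux pps hp t steps 0 le_rfl, hcnt, pv_pos_max?]

-- (9) items of a guarded insert-fold over distinct fresh keys
lemma pv_guarded_items {ν : Type} (q : String → Prop) [DecidablePred q] (g : String → ν)
    (l : List String) (hl : l.Nodup) :
    ∀ d : PySem.Dict String ν, (∀ x ∈ l, d.contains x = false) →
      (l.foldl (fun r x => if q x then r.insert x (g x) else r) d).items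
        = d.items ++ (l.filter (fun x => decide (q x))).map (fun x => (x, g x)) := by
  induction l with
  | nil => intro d _; simp
  | cons x l ih =>
      intro d hfresh
      simp only [List.nodup_cons] at hl
      simp only [List.foldl_cons, List.filter_cons]
      by_cases hq : q x
      · rw [if_pos hq]
        have hfresh' : ∀ y ∈ l, (d.insert x (g x)).contains y = false := by
          intro y hy
          rw [PySem.Dict.contains_insert]
          have : (y == x) = false := by
            simp [beq_iff_eq]; intro h; exact hl.1 (h ▸ hy)
          simp [this, hfresh y (by simp [hy])]
        rw [ih hl.2 _ hfresh', PySem.Dict.items_insert_of_not_contains _ _ (hfresh x (by simp))]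
        simp [hq]
      · rw [if_neg hq, ih hl.2 _ (fun y hy => hfresh y (by simp [hy]))]
        simp [hq]

-- (9') A's station_requirements, characterized
lemma pv_R_items (steps : List (PySem.Dict String (PySem.Dict String Int))) (pps : Int) :
    (pv_get_station_equipment_requirements steps pps).items
      = ((pvKeySet steps).filter (fun t => decide (pvRc steps pps t > 0))).map
          (fun t => (t, PySem.Dict.empty.insert "count" (pvRc steps pps t))) := by
  cases steps with
  | nil => rfl
  | cons s0 rest =>
      show (List.foldl
          (fun r x =>
            if pvRc (s0 :: rest) pps x > 0 then
              r.insert x (PySem.Dict.empty.insert "count" (pvRc (s0 :: rest) pps x))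
            else r)
          PySem.Dict.empty (pvKeySet (s0 :: rest))).items = _
      rw [pv_guarded_items (fun x => pvRc (s0 :: rest) pps x > 0)
        (fun x => PySem.Dict.empty.insert "count" (pvRc (s0 :: rest) pps x))
        (pvKeySet (s0 :: rest)) (pv_keySet_nodup (s0 :: rest) PySem.Set.empty List.nodup_nil)
        PySem.Dict.empty (by intro x _; rfl)]
      rfl

-- (11) get? through a value-mapped item list
lemma pv_get?_mk_map {ν μ : Type} (ps : List (String × ν)) (f : ν → μ) :
    ∀ t : String,
      (PySem.Dict.mk (ps.map (fun p => (p.1, f p.2)))).get? t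
        = ((PySem.Dict.mk ps).get? t).map f := by
  induction ps with
  | nil => intro t; rfl
  | cons q ps ih =>
      intro t
      simp only [List.map_cons]
      rw [PySem.Dict.get?_mk_cons, PySem.Dict.get?_mk_cons]
      by_cases h : (q.1 == t) = true
      · simp [h]
      · simp only [h, Bool.false_eq_true, if_false]
        · exact ih t

-- (12) A's merge loop, valuewise
lemma pv_merge_getD (ps : List (String × PySem.Dict String Int)) :
    ∀ (acc : PySem.Dict String (PySem.Dict String Int)) (t : String),
      ((ps.foldl (fun tu p =>
            if tu.contains p.1 then
              tu.modify p.1 PySem.Dict.empty (fun inner => inner.modify "count" 0 (· + p.2.getD "count" 0))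
            else tu.insert p.1 (PySem.Dict.empty.insert "count" (p.2.getD "count" 0))) acc).getD t
          PySem.Dict.empty).getD "count" 0
        = (acc.getD t PySem.Dict.empty).getD "count" 0
            + ((ps.filter (fun p => p.1 == t)).map (fun p => p.2.getD "count" 0)).sum := by
  induction ps with
  | nil => intro acc t; simp
  | cons q ps ih =>
      intro acc t
      simp only [List.foldl_cons, List.filter_cons]
      by_cases ht : (q.1 == t) = true
      · have ht' : q.1 = t := by simpa using ht
        subst ht'
        rw [ht]
        simp only [if_pos, List.map_cons, List.sum_cons]
        by_cases hc : acc.contains q.1 = true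
        · rw [if_pos hc, ih]
          rw [PySem.Dict.getD_modify_self, PySem.Dict.getD_modify_self]
          ring
        · rw [if_neg hc, ih]
          have h1 : acc.getD q.1 PySem.Dict.empty = PySem.Dict.empty :=
            PySem.Dict.getD_of_not_contains acc PySem.Dict.empty (by simpa using hc)
          rw [PySem.Dict.getD_insert_self, PySem.Dict.getD_insert_self, h1, PySem.Dict.getD_empty]
          ring
      · have hne : t ≠ q.1 := by
          intro h; exact ht (by simp [h])
        have htf : (q.1 == t) = false := by simpa using ht
        rw [htf]
        simp only [Bool.false_eq_true, if_false]
        by_cases hc : acc.contains q.1 = true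
        · rw [if_pos hc, ih]
          rw [PySem.Dict.getD_modify_of_ne acc PySem.Dict.empty _ hne]
        · rw [if_neg hc, ih]
          rw [PySem.Dict.getD_insert_of_ne acc _ PySem.Dict.empty hne]

-- (13) A's merge loop, keywise
lemma pv_merge_keys (ps : List (String × PySem.Dict String Int))
    (hnd : (ps.map Prod.fst).Nodup) :
    ∀ acc : PySem.Dict String (PySem.Dict String Int),
      (ps.foldl (fun tu p =>
          if tu.contains p.1 then
            tu.modify p.1 PySem.Dict.empty (fun inner => inner.modify "count" 0 (· + p.2.getD "count" 0))
          else tu.insert p.1 (PySem.Dict.empty.insert "count" (p.2.getD "count" 0))) acc).keys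
        = acc.keys ++ (ps.map Prod.fst).filter (fun k => !acc.contains k) := by
  induction ps with
  | nil => intro acc; simp
  | cons q ps ih =>
      intro acc
      simp only [List.map_cons, List.nodup_cons] at hnd
      simp only [List.foldl_cons, List.map_cons, List.filter_cons]
      by_cases hc : acc.contains q.1 = true
      · rw [if_pos hc, ih hnd.2]
        have hk : (acc.modify q.1 PySem.Dict.empty
            (fun inner => inner.modify "count" 0 (· + q.2.getD "count" 0))).keys = acc.keys := by
          rw [PySem.Dict.keys_modify, PySem.Dict.keys_insert_of_contains acc _ hc]
        rw [hk]
        have hcg : (ps.map Prod.fst).filter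
            (fun k => !(acc.modify q.1 PySem.Dict.empty
              (fun inner => inner.modify "count" 0 (· + q.2.getD "count" 0))).contains k)
            = (ps.map Prod.fst).filter (fun k => !acc.contains k) := by
          apply List.filter_congr
          intro k _
          rw [PySem.Dict.contains_modify]
          by_cases hkq : k = q.1
          · subst hkq; simp [hc]
          · simp [hkq]
        rw [hcg]
        simp [hc]
      · rw [if_neg hc, ih hnd.2]
        rw [PySem.Dict.keys_insert_of_not_contains acc _ (by simpa using hc)]
        have hcg : (ps.map Prod.fst).filter
            (fun k => !(acc.insert q.1 (PySem.Dict.empty.insert "count" (q.2.getD "count" 0))).contains k)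
            = (ps.map Prod.fst).filter (fun k => !acc.contains k) := by
          apply List.filter_congr
          intro k hk2
          rw [PySem.Dict.contains_insert]
          have : (k == q.1) = false := by
            simp only [beq_eq_false_iff_ne, ne_eq]
            intro h; exact hnd.1 (h ▸ hk2)
          rw [this]
          simp
        rw [hcg]
        have : (!acc.contains q.1) = true := by simpa using hc
        simp [this]

-- (14) get? through the positive-filter comprehension of B
lemma pv_get?_mk_filter (ps : List (String × Int)) (hnd : (ps.map Prod.fst).Nodup) :
    ∀ t : String,
      (PySem.Dict.mk (ps.filter (fun p => p.2 > 0))).get? t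
        = match (PySem.Dict.mk ps).get? t with
          | some v => if v > 0 then some v else none
          | none => none := by
  induction ps with
  | nil => intro t; rfl
  | cons q ps ih =>
      intro t
      simp only [List.map_cons, List.nodup_cons] at hnd
      simp only [List.filter_cons]
      by_cases hq : q.2 > 0
      · simp only [hq, decide_true, if_true]
        rw [PySem.Dict.get?_mk_cons, PySem.Dict.get?_mk_cons]
        by_cases ht : (q.1 == t) = true
        · simp [ht, hq]
        · simp only [ht, Bool.false_eq_true, if_false]
          exact ih hnd.2 t
      · simp only [hq, decide_false, Bool.false_eq_true, if_false]
        rw [PySem.Dict.get?_mk_cons]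
        by_cases ht : (q.1 == t) = true
        · simp only [ht, if_true]
          have ht' : q.1 = t := by simpa using ht
          have hnm : t ∉ (ps.filter (fun p => decide (p.2 > 0))).map Prod.fst := by
            intro hm
            rcases List.mem_map.mp hm with ⟨p, hp, rfl⟩
            exact hnd.1 (ht' ▸ List.mem_map.mpr ⟨p, List.mem_of_mem_filter hp, rfl⟩)
          have : (PySem.Dict.mk (ps.filter (fun p => decide (p.2 > 0)))).get? t = none := by
            rw [PySem.Dict.get?_eq_none_iff_not_mem_keys]
            simpa using hnm
          rw [this]
          simp [hq]
        · simp only [ht, Bool.false_eq_true, if_false]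
          exact ih hnd.2 t

-- bridging lemmas for the final assembly
lemma pv_all_congr (l1 l2 : List String) (f g : String → Bool)
    (hmem : ∀ t, t ∈ l1 ↔ t ∈ l2) (hfg : ∀ t, f t = g t) : l1.all f = l2.all g := by
  have h1 : l1.all f = true ↔ l2.all g = true := by
    simp only [List.all_eq_true]
    constructor
    · intro h x hx; rw [← hfg]; exact h x ((hmem x).mpr hx)
    · intro h x hx; rw [hfg]; exact h x ((hmem x).mp hx)
  revert h1
  cases l1.all f <;> cases l2.all g <;> simp

lemma pv_not_mem_keySet (steps : List (PySem.Dict String (PySem.Dict String Int)))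
    (t : String) (h : t ∉ pvKeySet steps) : ∀ s ∈ steps, s.contains t = false := by
  intro s hs
  by_contra hc
  have hc' : s.contains t = true := by simpa using hc
  have hm : t ∈ s.keys := by
    rw [PySem.Dict.contains_eq_decide_mem_keys] at hc'
    simpa using hc'
  exact h ((pv_mem_keySet steps PySem.Set.empty t).mpr (Or.inr ⟨s, hs, hm⟩))

lemma pv_gval_pos_mem (steps : List (PySem.Dict String (PySem.Dict String Int)))
    (pps : Int) (t : String) (h : pvGval steps pps t > 0) : t ∈ pvKeySet steps := by
  by_contra hm
  rw [pv_gval_of_no_contains steps pps t (pv_not_mem_keySet steps t hm)] at h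
  omega

lemma pv_rc_pos_iff (steps : List (PySem.Dict String (PySem.Dict String Int)))
    (pps : Int) (t : String) :
    (t ∈ pvKeySet steps ∧ pvRc steps pps t > 0) ↔ pvGval steps pps t > 0 := by
  have hpos := pv_pos_rc_eq_pos_gval steps pps t
  unfold pvPos at hpos
  constructor
  · rintro ⟨_, hr⟩
    rw [if_pos hr] at hpos
    by_cases hg : pvGval steps pps t > 0
    · exact hg
    · rw [if_neg hg] at hpos; omega
  · intro hg
    refine ⟨pv_gval_pos_mem steps pps t hg, ?_⟩
    rw [if_pos hg] at hpos
    by_cases hr : pvRc steps pps t > 0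
    · exact hr
    · rw [if_neg hr] at hpos; omega

lemma pv_ifpart (steps : List (PySem.Dict String (PySem.Dict String Int)))
    (pps : Int) (t : String) :
    (if t ∈ pvKeySet steps ∧ pvRc steps pps t > 0 then pvRc steps pps t else 0)
      = pvPos (pvGval steps pps t) := by
  rw [← pv_pos_rc_eq_pos_gval]
  unfold pvPos
  by_cases hm : t ∈ pvKeySet steps
  · by_cases hr : pvRc steps pps t > 0 <;> simp [hm, hr]
  · have h0 : pvRc steps pps t = 0 :=
      pv_rc_of_no_contains steps pps t (pv_not_mem_keySet steps t hm)
    simp [hm, h0]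

lemma pv_filter_beq_of_nodup (l : List String) (hl : l.Nodup) (t : String) :
    l.filter (fun x => x == t) = if t ∈ l then [t] else [] := by
  induction l with
  | nil => simp
  | cons x l ih =>
      simp only [List.nodup_cons] at hl
      simp only [List.filter_cons]
      by_cases h : x = t
      · subst h
        simp only [BEq.rfl, if_pos, List.mem_cons, true_or, if_true]
        rw [ih hl.2]
        simp [hl.1]
      · have : (x == t) = false := by simp [beq_iff_eq, h]
        simp only [this, Bool.false_eq_true, if_false]
        rw [ih hl.2]
        by_cases hm : t ∈ l <;> simp [hm, Ne.symm h, h]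

-- the whole computation after boundary conversion and the emptiness test
lemma pv_core (steps : List (PySem.Dict String (PySem.Dict String Int)))
    (cumD availD : PySem.Dict String (PySem.Dict String Int))
    (hsteps : ∀ s ∈ steps, s.keys.Nodup) (hcnd : cumD.keys.Nodup) (pps : Int) :
    (((pv_get_station_equipment_requirements steps pps).items.foldl
        (fun tu p =>
          if tu.contains p.1 then
            tu.modify p.1 PySem.Dict.empty (fun inner => inner.modify "count" 0 (· + p.2.getD "count" 0))
          else tu.insert p.1 (PySem.Dict.empty.insert "count" (p.2.getD "count" 0)))
        (cumD.items.foldl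
          (fun t p => t.insert p.1 (PySem.Dict.empty.insert "count" (p.2.getD "count" 0)))
          PySem.Dict.empty)).items.all
      (fun p => !(p.2.getD "count" 0 > (availD.getD p.1 PySem.Dict.empty).getD "count" 0)))
    = ((PySem.Set.union (PySem.Set.ofList cumD.keys)
          (PySem.Dict.mk ((steps.foldl (fun totals step =>
              step.items.foldl
                (fun totals p =>
                  if pps > 1 then totals.insert p.1 (totals.getD p.1 0 + p.2.getD "count" 0)
                  else totals.insert p.1 (max (totals.getD p.1 0) (p.2.getD "count" 0)))
                totals) PySem.Dict.empty).items.filter (fun p => p.2 > 0))).keys).all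
        (fun t =>
          !((cumD.getD t PySem.Dict.empty).getD "count" 0 +
              (PySem.Dict.mk ((steps.foldl (fun totals step =>
                  step.items.foldl
                    (fun totals p =>
                      if pps > 1 then totals.insert p.1 (totals.getD p.1 0 + p.2.getD "count" 0)
                      else totals.insert p.1 (max (totals.getD p.1 0) (p.2.getD "count" 0)))
                    totals) PySem.Dict.empty).items.filter (fun p => p.2 > 0))).getD t 0
            > (availD.getD t PySem.Dict.empty).getD "count" 0))) := by
  -- normalize B's inner loop body to the pvOp form
  have hinner : (fun (totals : PySem.Dict String Int) (p : String × PySem.Dict String Int) =>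
      if pps > 1 then totals.insert p.1 (totals.getD p.1 0 + p.2.getD "count" 0)
      else totals.insert p.1 (max (totals.getD p.1 0) (p.2.getD "count" 0)))
      = fun totals p => totals.insert p.1 (pvOp pps (totals.getD p.1 0) (p.2.getD "count" 0)) := by
    funext r p
    unfold pvOp
    split_ifs <;> rfl
  simp only [hinner]
  set R := pv_get_station_equipment_requirements steps pps with hRdef
  set totals := steps.foldl (fun totals step =>
      step.items.foldl
        (fun totals p => totals.insert p.1 (pvOp pps (totals.getD p.1 0) (p.2.getD "count" 0)))
        totals) PySem.Dict.empty with htotdef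
  set required := PySem.Dict.mk (totals.items.filter (fun p => p.2 > 0)) with hreqdef
  set test1 := cumD.items.foldl
      (fun t p => t.insert p.1 (PySem.Dict.empty.insert "count" (p.2.getD "count" 0)))
      PySem.Dict.empty with htest1def
  set test2 := R.items.foldl
      (fun tu p =>
        if tu.contains p.1 then
          tu.modify p.1 PySem.Dict.empty (fun inner => inner.modify "count" 0 (· + p.2.getD "count" 0))
        else tu.insert p.1 (PySem.Dict.empty.insert "count" (p.2.getD "count" 0))) test1 with htest2def
  -- test1: a value-mapped copy of cumD
  have h1 : test1.items = cumD.items.map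
      (fun p => (p.1, PySem.Dict.empty.insert "count" (p.2.getD "count" 0))) := by
    rw [htest1def]
    have := PySem.Dict.items_foldl_insert_fresh cumD.items Prod.fst
      (fun p => PySem.Dict.empty.insert "count" (p.2.getD "count" 0)) PySem.Dict.empty
      (fun a _ => rfl) hcnd
    simpa using this
  have hk1 : test1.keys = cumD.keys := by
    simp only [PySem.Dict.keys]
    rw [h1, List.map_map]
    exact List.map_congr_left (fun a _ => rfl)
  have htc1 : ∀ t : String,
      (test1.getD t PySem.Dict.empty).getD "count" 0
        = (cumD.getD t PySem.Dict.empty).getD "count" 0 := by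
    intro t
    have hmk : test1 = PySem.Dict.mk (cumD.items.map
        (fun p => (p.1, PySem.Dict.empty.insert "count" (p.2.getD "count" 0)))) :=
      PySem.Dict.ext h1
    rw [PySem.Dict.getD_eq_get?_getD test1 t PySem.Dict.empty, hmk,
      pv_get?_mk_map cumD.items (fun v => PySem.Dict.empty.insert "count" (v.getD "count" 0)) t,
      PySem.Dict.getD_eq_get?_getD cumD t PySem.Dict.empty]
    cases cumD.get? t with
    | none => simp [PySem.Dict.getD_empty]
    | some v => simp [PySem.Dict.getD_insert_self]
  have hcont1 : ∀ t : String, test1.contains t = cumD.contains t := by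
    intro t
    rw [PySem.Dict.contains_eq_decide_mem_keys, PySem.Dict.contains_eq_decide_mem_keys, hk1]
  -- R: characterized item list
  have hR := pv_R_items steps pps
  rw [← hRdef] at hR
  have hfilterednd : ((pvKeySet steps).filter (fun t => decide (pvRc steps pps t > 0))).Nodup :=
    (pv_keySet_nodup steps PySem.Set.empty List.nodup_nil).filter _
  have hRkeys : R.items.map Prod.fst
      = (pvKeySet steps).filter (fun t => decide (pvRc steps pps t > 0)) := by
    rw [hR, List.map_map]
    have : ((pvKeySet steps).filter (fun t => decide (pvRc steps pps t > 0))).map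
        (Prod.fst ∘ fun t => (t, PySem.Dict.empty.insert "count" (pvRc steps pps t)))
        = ((pvKeySet steps).filter (fun t => decide (pvRc steps pps t > 0))).map (fun t => t) :=
      List.map_congr_left (fun a _ => rfl)
    rw [this, List.map_id']
  have hRnd : (R.items.map Prod.fst).Nodup := by rw [hRkeys]; exact hfilterednd
  -- totals: value and key facts
  have htotv : ∀ t : String, totals.getD t 0 = pvGval steps pps t := by
    intro t
    rw [htotdef, pv_req_getD pps steps hsteps PySem.Dict.empty t, PySem.Dict.getD_empty]
    rfl
  have htotnd : totals.keys.Nodup := by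
    rw [htotdef]
    exact pv_req_keys_nodup pps steps PySem.Dict.empty
      (by rw [PySem.Dict.keys_empty]; exact List.nodup_nil)
  have htotnd' : (totals.items.map Prod.fst).Nodup := htotnd
  have hmktot : PySem.Dict.mk totals.items = totals := rfl
  -- required: get? in terms of totals, hence of pvGval
  have hreqget : ∀ t : String,
      required.get? t = match totals.get? t with
        | some v => if v > 0 then some v else none
        | none => none := by
    intro t
    rw [hreqdef, pv_get?_mk_filter totals.items htotnd' t, hmktot]
  have hreqv : ∀ t : String, required.getD t 0 = pvPos (pvGval steps pps t) := by
    intro t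
    rw [PySem.Dict.getD_eq_get?_getD, hreqget t, ← htotv t,
      PySem.Dict.getD_eq_get?_getD totals t 0]
    unfold pvPos
    cases totals.get? t with
    | none => simp
    | some v => by_cases hv : v > 0 <;> simp [hv]
  have hreqmem : ∀ t : String, t ∈ required.keys ↔ pvGval steps pps t > 0 := by
    intro t
    constructor
    · intro hm
      have hsome : required.get? t ≠ none := by
        rw [ne_eq, PySem.Dict.get?_eq_none_iff_not_mem_keys]
        simp [hm]
      rw [hreqget t] at hsome
      rw [← htotv t, PySem.Dict.getD_eq_get?_getD totals t 0]
      cases hq : totals.get? t with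
      | none => rw [hq] at hsome; simp at hsome
      | some v =>
          rw [hq] at hsome
          by_cases hv : v > 0
          · simpa using hv
          · simp [hv] at hsome
    · intro hg
      have hv := htotv t
      rw [PySem.Dict.getD_eq_get?_getD totals t 0] at hv
      by_contra hm
      have : required.get? t = none := (PySem.Dict.get?_eq_none_iff_not_mem_keys _ _).mpr hm
      rw [hreqget t] at this
      cases hq : totals.get? t with
      | none => rw [hq] at hv; simp at hv; omega
      | some v =>
          rw [hq] at this hv
          simp only [Option.getD_some] at hv
          by_cases hvp : v > 0
          · simp [hvp] at this
          · omega
  -- test2: values and keys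
  have hval : ∀ t : String,
      (test2.getD t PySem.Dict.empty).getD "count" 0
        = (cumD.getD t PySem.Dict.empty).getD "count" 0 + pvPos (pvGval steps pps t) := by
    intro t
    rw [htest2def, pv_merge_getD R.items test1 t, htc1 t]
    congr 1
    have hpc : ((fun (p : String × PySem.Dict String Int) => p.1 == t) ∘
        fun x => (x, PySem.Dict.empty.insert "count" (pvRc steps pps x))) = fun x => x == t :=
      funext (fun x => rfl)
    rw [hR, List.filter_map, hpc, List.map_map,
      pv_filter_beq_of_nodup _ hfilterednd t]
    by_cases hmem : t ∈ (pvKeySet steps).filter (fun t => decide (pvRc steps pps t > 0))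
    · rcases List.mem_filter.mp hmem with ⟨hks, hrc⟩
      rw [if_pos hmem]
      have : (if t ∈ pvKeySet steps ∧ pvRc steps pps t > 0 then pvRc steps pps t else 0)
          = pvPos (pvGval steps pps t) := pv_ifpart steps pps t
      rw [← this, if_pos ⟨hks, of_decide_eq_true hrc⟩]
      simp [PySem.Dict.getD_insert_self]
    · rw [if_neg hmem]
      have hni : ¬ (t ∈ pvKeySet steps ∧ pvRc steps pps t > 0) := by
        intro hand
        exact hmem (List.mem_filter.mpr ⟨hand.1, decide_eq_true hand.2⟩)
      rw [← pv_ifpart steps pps t, if_neg hni]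
      rfl
  have hkeys2 : test2.keys = cumD.keys ++
      (R.items.map Prod.fst).filter (fun k => !test1.contains k) := by
    rw [htest2def, pv_merge_keys R.items hRnd test1, hk1]
  have hnd2 : test2.keys.Nodup := by
    rw [hkeys2]
    refine List.Nodup.append hcnd (hRnd.filter _) ?_
    intro a ha hfa
    rcases List.mem_filter.mp hfa with ⟨_, hcf⟩
    rw [hcont1 a, PySem.Dict.contains_eq_decide_mem_keys] at hcf
    simp only [Bool.not_eq_eq_eq_not, Bool.not_true, decide_eq_false_iff_not] at hcf
    exact hcf ha
  -- membership in test2.keys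
  have hmem2 : ∀ t : String, t ∈ test2.keys ↔ t ∈ cumD.keys ∨ pvGval steps pps t > 0 := by
    intro t
    rw [hkeys2]
    simp only [List.mem_append]
    constructor
    · rintro (h | h)
      · exact Or.inl h
      · rcases List.mem_filter.mp h with ⟨hmm, _⟩
        rw [hRkeys] at hmm
        rcases List.mem_filter.mp hmm with ⟨hks, hrc⟩
        exact Or.inr ((pv_rc_pos_iff steps pps t).mp ⟨hks, of_decide_eq_true hrc⟩)
    · rintro (h | h)
      · exact Or.inl h
      · by_cases hc : t ∈ cumD.keys
        · exact Or.inl hc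
        · refine Or.inr (List.mem_filter.mpr ⟨?_, ?_⟩)
          · rw [hRkeys]
            rcases (pv_rc_pos_iff steps pps t).mpr h with ⟨hks, hrc⟩
            exact List.mem_filter.mpr ⟨hks, decide_eq_true hrc⟩
          · rw [hcont1 t, PySem.Dict.contains_eq_decide_mem_keys]
            simp [hc]
  -- reduce A's all over items to an all over keys
  rw [PySem.Dict.items_eq_map_keys test2 hnd2 PySem.Dict.empty, List.all_map]
  -- finish by congruence of the two key lists and of the two per-key tests
  apply pv_all_congr
  · intro t
    rw [hmem2 t, PySem.Set.mem_union]
    rw [PySem.Set.mem_ofList, hreqmem t]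
  · intro t
    show (!((test2.getD t PySem.Dict.empty).getD "count" 0 >
        (availD.getD t PySem.Dict.empty).getD "count" 0)) = _
    rw [hval t, ← hreqv t]

-- main equivalence, argument by argument
lemma pv_main (step_equipments : List (List (String × List (String × Int))))
    (cumulative_station_usage : List (String × List (String × Int)))
    (available_inventory : List (String × List (String × Int)))
    (people_per_station : Int) :
    can_add_station_to_workout step_equipments cumulative_station_usage available_inventory people_per_station
      = can_add_station_to_workout_alt step_equipments cumulative_station_usage available_inventory people_per_station := by
  unfold can_add_station_to_workout can_add_station_to_workout_alt
  by_cases hav : available_inventory.isEmpty = true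
  · rw [if_pos hav, if_pos hav]
  · rw [if_neg hav, if_neg hav]
    exact pv_core (step_equipments.map pvDict) (pvDict cumulative_station_usage)
      (pvDict available_inventory)
      (by
        intro s hs
        rcases List.mem_map.mp hs with ⟨x, _, rfl⟩
        exact PySem.Dict.nodup_keys_ofList _)
      (PySem.Dict.nodup_keys_ofList _) people_per_station

-- ===== VERDICT (by name: the statement is the Claim_ definition above) =====
theorem can_add_station_to_workout_spec : Claim_equal_can_add_station_to_workout := by
  intro se cum avail pps _ _
  unfold Spec_can_add_station_to_workout
  exact pv_main se cum avail pps
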